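-- pv_equiv track=rewrite | github.com/Naman195/DSA_Practice | Stack/extraP.py | passwordStrengthChecker
-- ===== SOURCE A (Python) =====
-- def passwordStrengthChecker(s):
--     maxStrength = 0
--     currStrength = 1
--
--     for i in range(1, len(s)):
--         if s[i] == s[i-1]:
--             currStrength = 1
--         else:
--             currStrength += 1
--             maxStrength = max(maxStrength, currStrength)
--
--     return maxStrength
-- ===== SOURCE B (Python) =====
-- def passwordStrengthChecker(s):
--     # Segment view: the string splits at every position i where s[i] == s[i-1]
--     # into maximal blocks with all-distinct adjacent characters; the answer is
--     # the longest block length (blocks of a single character score 0).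
--     n = len(s)
--     bounds = [0] + [i for i in range(1, n) if s[i] == s[i-1]] + [n]
--     m = max(b - a for a, b in zip(bounds, bounds[1:]))
--     return m if m >= 2 else 0
-- ===== Notes on version B (the rewrite author's own statement) =====
-- stated objective: alternative
-- what changed: B materialises the break positions (indices i with s[i]==s[i-1]) as an explicit boundary list [0]+breaks+[n], takes the maximum gap between consecutive boundaries via zip, and clips gaps below 2 to 0, instead of A's single index loop maintaining a running strength and running max.
import Mathlib
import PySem

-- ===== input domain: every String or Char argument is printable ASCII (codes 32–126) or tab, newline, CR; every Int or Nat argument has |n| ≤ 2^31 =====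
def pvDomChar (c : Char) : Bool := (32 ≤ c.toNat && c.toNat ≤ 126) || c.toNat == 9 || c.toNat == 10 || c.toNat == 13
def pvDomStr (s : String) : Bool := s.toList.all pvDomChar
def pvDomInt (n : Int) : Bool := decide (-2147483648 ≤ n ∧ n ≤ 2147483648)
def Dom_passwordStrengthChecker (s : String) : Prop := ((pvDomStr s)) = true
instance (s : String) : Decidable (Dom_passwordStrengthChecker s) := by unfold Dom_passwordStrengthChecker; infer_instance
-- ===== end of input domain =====

-- B lists the break positions (i with s[i] == s[i-1]) as an explicit boundary list and returns
-- the largest gap between consecutive boundaries (gaps below 2 score 0), instead of A's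
-- running-strength loop; objective: alternative decomposition.

-- ===== PORT A =====
def passwordStrengthChecker (s : String) : Int :=
  let l := s.toList
  let st := (PySem.List.pyRange 1 (l.length : Int) 1).foldl
    (fun (st : Int × Int) i =>
      if PySem.List.pyGetD l i ' ' == PySem.List.pyGetD l (i - 1) ' ' then
        (st.1, 1)
      else
        let curr := st.2 + 1
        (max st.1 curr, curr))
    (0, 1)
  st.1

-- ===== PORT B =====
def passwordStrengthChecker_alt (s : String) : Int :=
  let l := s.toList
  let n : Int := l.length
  let bounds := [(0 : Int)] ++
    ((PySem.List.pyRange 1 n 1).filter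
      (fun i => PySem.List.pyGetD l i ' ' == PySem.List.pyGetD l (i - 1) ' ')) ++ [n]
  let gaps := (bounds.zip bounds.tail).map (fun p => p.2 - p.1)
  -- Python's max(...) on this generator never raises: gaps is nonempty since bounds
  -- always has at least the two entries 0 and n, so the `none` branch is unreachable
  match PySem.List.max? gaps (fun y => y) with
  | some m => if m ≥ 2 then m else 0
  | none => 0

-- ===== PRECONDITION & SPEC =====
def Spec_passwordStrengthChecker (s : String) (out : Int) : Prop := out = passwordStrengthChecker_alt s
instance (s : String) (out : Int) : Decidable (Spec_passwordStrengthChecker s out) := by unfold Spec_passwordStrengthChecker; infer_instance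

-- ===== CLAIM (what is proved, stated in full; the proofs are below) =====
def Claim_equal_passwordStrengthChecker : Prop := ∀ (s : String), Dom_passwordStrengthChecker s → Spec_passwordStrengthChecker s (passwordStrengthChecker s)

-- ===== LEMMAS AND PROOFS =====

-- A's loop body as a function of the state and the equality flag of the (prev, cur) pair
def pvStepA (st : Int × Int) (eq : Bool) : Int × Int :=
  if eq then (st.1, 1) else (max st.1 (st.2 + 1), st.2 + 1)

-- A's loop body on the (prev, cur) character pair itself
def pvStepP (st : Int × Int) (p : Char × Char) : Int × Int := pvStepA st (p.2 == p.1)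

-- equality flags of adjacent pairs
def pvFlags (l : List Char) : List Bool := (l.zip l.tail).map (fun q => q.2 == q.1)

def pvClip (x : Int) : Int := if x ≥ 2 then x else 0

-- max block length over the flag list; c = length of the open current block
def pvSegsMax : List Bool → Int → Int
  | [], c => c
  | true :: t, c => max c (pvSegsMax t 1)
  | false :: t, c => pvSegsMax t (c + 1)

-- break positions of the flag list, current position p
def pvBp : List Bool → Int → List Int
  | [], _ => []
  | true :: t, p => p :: pvBp t (p + 1)
  | false :: t, p => pvBp t (p + 1)

-- max gap of the boundary list a :: xs ++ [n]
def pvGmax : Int → List Int → Int → Int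
  | a, [], n => n - a
  | a, x :: xs, n => max (x - a) (pvGmax x xs n)

-- successive differences of a :: L
def pvDiffs : Int → List Int → List Int
  | _, [] => []
  | a, y :: ys => (y - a) :: pvDiffs y ys

lemma pv_range_pairs (l : List Char) :
    (PySem.List.pyRange 1 (l.length : Int) 1).map
      (fun i => (PySem.List.pyGetD l (i - 1) ' ', PySem.List.pyGetD l i ' ')) = l.zip l.tail := by
  rw [PySem.List.pyRange_one, List.map_map]
  apply List.ext_getElem
  · simp only [List.length_map, List.length_range, List.length_zip, List.length_tail]
    omega
  · intro i h1 h2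
    simp only [List.getElem_map, List.getElem_range, Function.comp_apply, List.getElem_zip,
      List.getElem_tail]
    have hlen : i + 1 < l.length := by
      simp at h1; omega
    have e1 : (1 : Int) + (i : Int) - 1 = ((i : Nat) : Int) := by ring
    have e2 : (1 : Int) + (i : Int) = (((i + 1 : Nat)) : Int) := by push_cast; ring
    rw [e1, e2, PySem.List.pyGetD_natCast, PySem.List.pyGetD_natCast,
      List.getD_eq_getElem l ' ' (by omega), List.getD_eq_getElem l ' ' hlen]

lemma pv_segsMax_ge (t : List Bool) : ∀ c : Int, c ≤ pvSegsMax t c := by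
  induction t with
  | nil => intro c; simp [pvSegsMax]
  | cons f t ih =>
    intro c
    cases f with
    | true => simp [pvSegsMax]
    | false =>
      have := ih (c + 1)
      simp only [pvSegsMax]
      omega

-- A's loop invariant: the accumulated max equals the clipped best block so far
lemma pv_lemA (flags : List Bool) : ∀ b c : Int, 0 ≤ b → 1 ≤ c → (2 ≤ c → c ≤ b) →
    (flags.foldl pvStepA (b, c)).1 = max b (pvClip (pvSegsMax flags c)) := by
  induction flags with
  | nil =>
    intro b c hb hc hcb
    simp only [List.foldl_nil, pvSegsMax, pvClip]
    split_ifs with h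
    · omega
    · omega
  | cons f t ih =>
    intro b c hb hc hcb
    cases f with
    | true =>
      have hstep : pvStepA (b, c) true = (b, 1) := by simp [pvStepA]
      simp only [List.foldl_cons, hstep]
      rw [ih b 1 hb le_rfl (by omega)]
      have h1 : (1 : Int) ≤ pvSegsMax t 1 := pv_segsMax_ge t 1
      simp only [pvSegsMax, pvClip]
      split_ifs <;> omega
    | false =>
      have hstep : pvStepA (b, c) false = (max b (c + 1), c + 1) := by simp [pvStepA]
      simp only [List.foldl_cons, hstep]
      rw [ih (max b (c + 1)) (c + 1) (by omega) (by omega) (by omega)]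
      have hge : c + 1 ≤ pvSegsMax t (c + 1) := pv_segsMax_ge t (c + 1)
      simp only [pvSegsMax, pvClip]
      split_ifs <;> omega

-- the max gap of the break-position boundaries is the max block length
lemma pv_lemG (flags : List Bool) : ∀ a p : Int,
    pvGmax a (pvBp flags p) (p + flags.length) = pvSegsMax flags (p - a) := by
  induction flags with
  | nil => intro a p; simp [pvBp, pvGmax, pvSegsMax]
  | cons f t ih =>
    intro a p
    cases f with
    | true =>
      have h := ih p (p + 1)
      simp only [pvBp, pvGmax, pvSegsMax, List.length_cons]
      push_cast
      rw [show p + ((t.length : Int) + 1) = (p + 1) + t.length by ring, h]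
      norm_num
    | false =>
      have h := ih a (p + 1)
      simp only [pvBp, pvSegsMax, List.length_cons]
      push_cast
      rw [show p + ((t.length : Int) + 1) = (p + 1) + t.length by ring, h]
      congr 1
      ring

lemma pv_diffs_zip (L : List Int) : ∀ a : Int,
    (((a :: L).zip L).map (fun p => p.2 - p.1)) = pvDiffs a L := by
  induction L with
  | nil => intro a; simp [pvDiffs]
  | cons y ys ih =>
    intro a
    simp only [List.zip_cons_cons, List.map_cons, pvDiffs]
    rw [ih y]

lemma pv_foldl_diffs (xs : List Int) : ∀ a n m : Int,
    (pvDiffs a (xs ++ [n])).foldl max m = max m (pvGmax a xs n) := by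
  induction xs with
  | nil => intro a n m; simp [pvDiffs, pvGmax]
  | cons x xs ih =>
    intro a n m
    simp only [List.cons_append, pvDiffs, pvGmax, List.foldl_cons]
    rw [ih x n (max m (x - a)), max_assoc]

lemma pv_max?_diffs (xs : List Int) (a n : Int) :
    PySem.List.max? (pvDiffs a (xs ++ [n])) (fun y => y) = some (pvGmax a xs n) := by
  cases xs with
  | nil =>
    simp [pvDiffs, pvGmax, PySem.List.max?_id_cons]
  | cons x xs =>
    simp only [List.cons_append, pvDiffs]
    rw [PySem.List.max?_id_cons, pv_foldl_diffs xs x n (x - a)]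
    simp [pvGmax]

-- break positions as a filter of the index range
lemma pv_bp_filter (flags : List Bool) : ∀ p : Int,
    pvBp flags p
      = ((List.range flags.length).filter (fun k => flags.getD k false)).map
          (fun k : Nat => p + (k : Int)) := by
  induction flags with
  | nil => intro p; simp [pvBp]
  | cons f t ih =>
    intro p
    have hmap : ((List.range t.length).map (· + 1)).filter
        (fun k => (f :: t).getD k false)
        = ((List.range t.length).filter (fun k => t.getD k false)).map (· + 1) := by
      rw [List.filter_map]; rfl
    have htail : (((List.range t.length).filter (fun k => t.getD k false)).map
          (· + 1)).map (fun k : Nat => p + (k : Int))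
        = pvBp t (p + 1) := by
      rw [List.map_map, ih (p + 1)]
      apply List.map_congr_left
      intro k _
      simp only [Function.comp_apply]
      push_cast
      ring
    rw [List.length_cons, List.range_succ_eq_map, List.filter_cons]
    cases f with
    | true =>
      rw [show ((true :: t).getD 0 false) = true from rfl, if_pos rfl, List.map_cons,
        hmap, htail]
      show p :: pvBp t (p + 1) = _ :: pvBp t (p + 1)
      congr 1
      simp
    | false =>
      rw [show ((false :: t).getD 0 false) = false from rfl, if_neg (by simp), hmap, htail]
      rfl

lemma pv_clip_nonneg (x : Int) : 0 ≤ pvClip x := by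
  unfold pvClip; split_ifs <;> omega

lemma pv_flags_len (l : List Char) : (pvFlags l).length = ((l.length : Int) - 1).toNat := by
  simp only [pvFlags, List.length_map, List.length_zip, List.length_tail]
  omega

-- the B-side filter computes exactly the break positions pvBp (pvFlags l) 1
lemma pv_filter_eq_bp (l : List Char) :
    ((PySem.List.pyRange 1 (l.length : Int) 1).filter
      (fun i => PySem.List.pyGetD l i ' ' == PySem.List.pyGetD l (i - 1) ' '))
      = pvBp (pvFlags l) 1 := by
  rw [PySem.List.pyRange_one, List.filter_map, pv_bp_filter, ← pv_flags_len l]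
  have hfil : (List.range (pvFlags l).length).filter
      ((fun i => PySem.List.pyGetD l i ' ' == PySem.List.pyGetD l (i - 1) ' ') ∘
        (fun k : Nat => (1 : Int) + k))
      = (List.range (pvFlags l).length).filter (fun k : Nat => (pvFlags l).getD k false) := by
    apply List.filter_congr
    intro k hk
    have hk' : k < (pvFlags l).length := List.mem_range.mp hk
    have hkl : k + 1 < l.length := by
      have := pv_flags_len l
      omega
    simp only [Function.comp_apply]
    have e1 : (1 : Int) + (k : Int) - 1 = ((k : Nat) : Int) := by ring
    have e2 : (1 : Int) + (k : Int) = (((k + 1 : Nat)) : Int) := by push_cast; ring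
    have g1 : l.getD (k + 1) ' ' = l[k + 1]'hkl := List.getD_eq_getElem l ' ' hkl
    have g2 : l.getD k ' ' = l[k]'(by omega) := List.getD_eq_getElem l ' ' (by omega)
    have g3 : (pvFlags l).getD k false = (pvFlags l)[k]'hk' :=
      List.getD_eq_getElem (pvFlags l) false hk'
    rw [e1, e2, PySem.List.pyGetD_natCast, PySem.List.pyGetD_natCast, g1, g2, g3]
    simp only [pvFlags, List.getElem_map, List.getElem_zip, List.getElem_tail]
  rw [hfil]

-- A's value as a function of the flag list
lemma pv_A_eq (l : List Char) :
    (List.foldl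
        (fun (st : Int × Int) i =>
          if PySem.List.pyGetD l i ' ' == PySem.List.pyGetD l (i - 1) ' ' then (st.1, 1)
          else (max st.1 (st.2 + 1), st.2 + 1))
        (0, 1) (PySem.List.pyRange 1 (l.length : Int) 1)).1
      = pvClip (pvSegsMax (pvFlags l) 1) := by
  have hA : List.foldl
      (fun (st : Int × Int) i =>
        if PySem.List.pyGetD l i ' ' == PySem.List.pyGetD l (i - 1) ' ' then (st.1, 1)
        else (max st.1 (st.2 + 1), st.2 + 1))
      (0, 1) (PySem.List.pyRange 1 (l.length : Int) 1)
      = (l.zip l.tail).foldl pvStepP (0, 1) := by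
    rw [← pv_range_pairs l, List.foldl_map]
    rfl
  have hF : (l.zip l.tail).foldl pvStepP (0, 1) = (pvFlags l).foldl pvStepA (0, 1) := by
    unfold pvFlags
    rw [List.foldl_map]
    rfl
  rw [hA, hF, pv_lemA (pvFlags l) 0 1 le_rfl le_rfl (by omega)]
  have := pv_clip_nonneg (pvSegsMax (pvFlags l) 1)
  omega

-- B's value as a function of the flag list (via the maximal boundary gap)
lemma pv_B_eq (l : List Char) :
    (match PySem.List.max?
        (List.map (fun p => p.2 - p.1)
          ((([(0 : Int)] ++
              ((PySem.List.pyRange 1 (l.length : Int) 1).filter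
                (fun i => PySem.List.pyGetD l i ' ' == PySem.List.pyGetD l (i - 1) ' ')) ++
              [(l.length : Int)]).zip
            (([(0 : Int)] ++
              ((PySem.List.pyRange 1 (l.length : Int) 1).filter
                (fun i => PySem.List.pyGetD l i ' ' == PySem.List.pyGetD l (i - 1) ' ')) ++
              [(l.length : Int)]).tail))))
        (fun y => y) with
     | some m => if m ≥ 2 then m else 0
     | none => 0)
      = pvClip (pvGmax 0 (pvBp (pvFlags l) 1) (l.length : Int)) := by
  rw [pv_filter_eq_bp l]
  have hb : ([(0 : Int)] ++ pvBp (pvFlags l) 1 ++ [(l.length : Int)])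
      = (0 : Int) :: (pvBp (pvFlags l) 1 ++ [(l.length : Int)]) := by simp
  rw [hb]
  have ht : ((0 : Int) :: (pvBp (pvFlags l) 1 ++ [(l.length : Int)])).tail
      = pvBp (pvFlags l) 1 ++ [(l.length : Int)] := rfl
  rw [ht, pv_diffs_zip, pv_max?_diffs]
  rfl

-- the two characterisations agree (clipping absorbs the empty-string discrepancy)
lemma pv_final (l : List Char) :
    pvClip (pvSegsMax (pvFlags l) 1)
      = pvClip (pvGmax 0 (pvBp (pvFlags l) 1) (l.length : Int)) := by
  cases l with
  | nil => rfl
  | cons ch rest =>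
    congr 1
    have hlen : ((ch :: rest).length : Int) = 1 + ((pvFlags (ch :: rest)).length : Int) := by
      have := pv_flags_len (ch :: rest)
      simp only [List.length_cons] at *
      omega
    rw [hlen]
    have h := pv_lemG (pvFlags (ch :: rest)) 0 1
    rw [h]
    norm_num

-- ===== VERDICT (by name: the statement is the Claim_ definition above) =====
theorem passwordStrengthChecker_spec : Claim_equal_passwordStrengthChecker := by
  intro s _
  unfold Spec_passwordStrengthChecker passwordStrengthChecker passwordStrengthChecker_alt
  set l := s.toList with hl
  simp only []
  rw [pv_A_eq l, pv_B_eq l, pv_final l]
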